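-- pv_equiv track=rewrite | github.com/gustavodsf/audio-process | audio_classify/src/pre_process_youtube.py | join_class_with_file
-- ===== SOURCE A (Python) =====
-- def join_class_with_file(file_name, class_name):
--   new_list = []
--   for key in file_name.keys():
--     file = {
--       "name": key,
--       "path": file_name[key][-1],
--       "class": ""
--     }
--     for ckey in class_name.keys():
--       if ckey in file_name[key]:
--         if file["class"] == "":
--           file["class"] = class_name[ckey][2]
--         elif file["class"] == "Music":
--           file["class"] = class_name[ckey][2]
--     new_list.append(file)
--   return new_list
-- ===== SOURCE B (Python) =====
-- def join_class_with_file(file_name, class_name):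
--     result = []
--     for key in file_name:
--         vals = [class_name[ckey][2] for ckey in class_name if ckey in file_name[key]]
--         cls = next((v for v in vals if v not in ("", "Music")), vals[-1] if vals else "")
--         result.append({"name": key, "path": file_name[key][-1], "class": cls})
--     return result
-- ===== Notes on version B (the rewrite author's own statement) =====
-- stated objective: simpler
-- what changed: Replaces A's stateful overwrite-the-class loop (a dict field mutated under ''/'Music' guards) with a gather-then-select decomposition: collect all matching class values in one comprehension, then pick the first value outside {'', 'Music'}, falling back to the last match (or '').
import Mathlib
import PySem

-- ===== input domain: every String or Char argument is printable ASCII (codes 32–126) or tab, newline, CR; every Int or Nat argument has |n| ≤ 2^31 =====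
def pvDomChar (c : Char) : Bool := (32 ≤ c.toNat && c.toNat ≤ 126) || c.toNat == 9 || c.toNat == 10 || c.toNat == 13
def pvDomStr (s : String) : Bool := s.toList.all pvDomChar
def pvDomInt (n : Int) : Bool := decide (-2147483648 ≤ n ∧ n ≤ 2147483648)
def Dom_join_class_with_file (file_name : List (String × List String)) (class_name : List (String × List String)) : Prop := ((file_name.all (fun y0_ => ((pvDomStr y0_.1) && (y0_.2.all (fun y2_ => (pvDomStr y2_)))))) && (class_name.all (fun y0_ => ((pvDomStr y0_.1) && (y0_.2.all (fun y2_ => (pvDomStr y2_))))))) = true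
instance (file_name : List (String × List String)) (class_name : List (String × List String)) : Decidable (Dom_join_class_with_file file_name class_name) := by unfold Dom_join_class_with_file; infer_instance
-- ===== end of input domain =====

-- B replaces A's stateful class-overwrite loop with a gather-then-select decomposition (same cost, simpler).


-- ===== PORT A =====
def join_class_with_file (file_name : List (String × List String)) (class_name : List (String × List String)) : List (List (String × String)) :=
  let fd := PySem.Dict.ofList file_name
  let cd := PySem.Dict.ofList class_name
  (fd.keys).foldl (fun new_list key =>
    let fv := fd.getD key []
    -- file = {"name": key, "path": file_name[key][-1], "class": ""}   (pyGetD (-1): Pre_ keeps value lists nonempty)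
    let file : PySem.Dict String String :=
      PySem.Dict.mk [("name", key), ("path", PySem.List.pyGetD fv (-1) ""), ("class", "")]
    let file := (cd.keys).foldl (fun file ckey =>
      if fv.contains ckey then
        if file.getD "class" "" == "" then
          file.insert "class" (PySem.List.pyGetD (cd.getD ckey []) 2 "")
        else if file.getD "class" "" == "Music" then
          file.insert "class" (PySem.List.pyGetD (cd.getD ckey []) 2 "")
        else file
      else file) file
    new_list ++ [file.items]) []

-- ===== PORT B =====
def join_class_with_file_alt (file_name : List (String × List String)) (class_name : List (String × List String)) : List (List (String × String)) :=
  let fd := PySem.Dict.ofList file_name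
  let cd := PySem.Dict.ofList class_name
  (fd.keys).foldl (fun result key =>
    let fv := fd.getD key []
    let vals := ((cd.keys).filter (fun ckey => fv.contains ckey)).map
      (fun ckey => PySem.List.pyGetD (cd.getD ckey []) 2 "")
    -- next((v for v in vals if v not in ("", "Music")), vals[-1] if vals else "")
    let cls := (vals.find? (fun v => !(v == "" || v == "Music"))).getD ((vals.getLast?).getD "")
    result ++ [[("name", key), ("path", PySem.List.pyGetD fv (-1) ""), ("class", cls)]]) []

-- ===== PRECONDITION & SPEC =====
-- Pre_ excludes exactly the inputs where Python A raises: a file whose value list is empty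
-- (file_name[key][-1] -> IndexError) or a matching class entry with fewer than 3 values
-- (class_name[ckey][2] -> IndexError).
def Pre_join_class_with_file (file_name : List (String × List String)) (class_name : List (String × List String)) : Prop :=
  ∀ p ∈ (PySem.Dict.ofList file_name).items, p.2 ≠ [] ∧
    ∀ q ∈ (PySem.Dict.ofList class_name).items, q.1 ∈ p.2 → 2 < q.2.length
instance (file_name : List (String × List String)) (class_name : List (String × List String)) : Decidable (Pre_join_class_with_file file_name class_name) := by unfold Pre_join_class_with_file; infer_instance
def pvWitness_join_class_with_file : (List (String × List String)) × (List (String × List String)) :=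
  ([("f1", ["x", "p1"]), ("f2", ["Music", "x", "p2"])], [("x", ["a", "b", "Rock"]), ("Music", ["a", "b", "Music"])])
def Spec_join_class_with_file (file_name : List (String × List String)) (class_name : List (String × List String)) (out : List (List (String × String))) : Prop := out = join_class_with_file_alt file_name class_name
instance (file_name : List (String × List String)) (class_name : List (String × List String)) (out : List (List (String × String))) : Decidable (Spec_join_class_with_file file_name class_name out) := by unfold Spec_join_class_with_file; infer_instance

-- ===== CLAIM (what is proved, stated in full; the proofs are below) =====
def Claim_equal_join_class_with_file : Prop := ∀ (file_name : List (String × List String)) (class_name : List (String × List String)), Dom_join_class_with_file file_name class_name → Pre_join_class_with_file file_name class_name → Spec_join_class_with_file file_name class_name (join_class_with_file file_name class_name)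

-- ===== LEMMAS AND PROOFS =====

-- A's inner loop keeps the file dict shaped [("name",k),("path",p),("class",st)]: inserting at "class" only rewrites st.
theorem jc_insert_class (k p c c' : String) :
    (PySem.Dict.mk [("name", k), ("path", p), ("class", c)]).insert "class" c'
      = PySem.Dict.mk [("name", k), ("path", p), ("class", c')] := by
  apply PySem.Dict.ext
  simp [PySem.Dict.items_insert]

theorem jc_getD_class (k p c : String) :
    (PySem.Dict.mk [("name", k), ("path", p), ("class", c)]).getD "class" "" = c := by
  simp [PySem.Dict.getD_eq_get?_getD, PySem.Dict.get?_mk_cons]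

-- A's inner fold over the dict state is the same fold on the "class" string alone.
theorem jc_inner_dict (fv : List String) (f : String → String) (cks : List String) (k p st : String) :
    cks.foldl (fun file ckey =>
      if fv.contains ckey then
        if file.getD "class" "" == "" then file.insert "class" (f ckey)
        else if file.getD "class" "" == "Music" then file.insert "class" (f ckey)
        else file
      else file) (PySem.Dict.mk [("name", k), ("path", p), ("class", st)])
    = PySem.Dict.mk [("name", k), ("path", p), ("class",
        cks.foldl (fun st ckey =>
          if fv.contains ckey then
            if st == "" then f ckey else if st == "Music" then f ckey else st
          else st) st)] := by
  induction cks generalizing st with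
  | nil => rfl
  | cons c rest ih =>
      simp only [List.foldl_cons, jc_getD_class, jc_insert_class]
      by_cases h : fv.contains c
      · simp only [h, if_true]
        by_cases h1 : (st == "" : Bool) = true
        · simp only [h1, if_true, ih]
        · simp only [Bool.not_eq_true] at h1
          simp only [h1, Bool.false_eq_true, if_false]
          by_cases h2 : (st == "Music" : Bool) = true
          · simp only [h2, if_true, ih]
          · simp only [Bool.not_eq_true] at h2
            simp only [h2, Bool.false_eq_true, if_false, ih]
      · simp only [h, Bool.false_eq_true, if_false, ih]

-- The matching values alone drive A's state machine: non-matching keys are skipped.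
theorem jc_fold_vals (fv : List String) (f : String → String) (cks : List String) (st : String) :
    cks.foldl (fun st ckey =>
      if fv.contains ckey then
        if st == "" then f ckey else if st == "Music" then f ckey else st
      else st) st
    = ((cks.filter (fun ckey => fv.contains ckey)).map f).foldl
        (fun st v => if st == "" then v else if st == "Music" then v else st) st := by
  induction cks generalizing st with
  | nil => rfl
  | cons c rest ih =>
      by_cases h : fv.contains c
      · simp only [List.foldl_cons, h, if_true, List.filter_cons_of_pos h, List.map_cons, ih]
      · have hcf : fv.contains c = false := by simpa using h
        simp only [List.foldl_cons, List.filter_cons, hcf, Bool.false_eq_true, if_false, ih]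

-- The state machine started at st equals B's select over the gathered values.
theorem jc_select (vals : List String) (st : String) :
    vals.foldl (fun st v => if st == "" then v else if st == "Music" then v else st) st
    = (if (st == "" || st == "Music" : Bool) then
        (vals.find? (fun v => !(v == "" || v == "Music"))).getD ((vals.getLast?).getD st)
      else st) := by
  induction vals generalizing st with
  | nil =>
      by_cases h : ((st == "" || st == "Music") : Bool) = true
      · simp only [List.foldl_nil, h, if_true, List.find?_nil, List.getLast?_nil,
          Option.getD_none]
      · simp only [Bool.not_eq_true] at h
        simp only [List.foldl_nil, h, Bool.false_eq_true, if_false]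
  | cons v vr ih =>
      by_cases hg : ((st == "" || st == "Music") : Bool) = true
      · have hstep : (if st == "" then v else if st == "Music" then v else st) = v := by
          rcases Bool.or_eq_true_iff.mp hg with h1 | h1
          · simp [h1]
          · by_cases h0 : (st == "" : Bool) = true
            · simp [h0]
            · simp only [Bool.not_eq_true] at h0
              simp [h0, h1]
        simp only [List.foldl_cons, hstep, ih, hg, if_true]
        by_cases hv : ((v == "" || v == "Music") : Bool) = true
        · rw [List.find?_cons_of_neg (by simp [hv])]
          simp only [hv, if_true]
          cases hf : vr.find? (fun v => !(v == "" || v == "Music")) with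
          | some w => simp
          | none =>
              simp only [Option.getD_none]
              cases vr with
              | nil => simp
              | cons w wr =>
                  obtain ⟨x, hx⟩ := Option.isSome_iff_exists.mp
                    (List.getLast?_isSome.mpr (List.cons_ne_nil w wr))
                  rw [List.getLast?_cons_cons, hx]
                  simp
        · simp only [Bool.not_eq_true] at hv
          rw [List.find?_cons_of_pos (by simp [hv])]
          simp [hv]
      · simp only [Bool.not_eq_true] at hg
        have h1 : (st == "") = false := by
          rcases h : (st == "" : Bool) with _ | _
          · rfl
          · rw [h] at hg; simp at hg
        have h2 : (st == "Music") = false := by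
          rcases h : (st == "Music" : Bool) with _ | _
          · rfl
          · rw [h] at hg; simp at hg
        simp only [List.foldl_cons, h1, h2, Bool.or_self, Bool.false_eq_true, if_false, ih]

-- ===== VERDICT (by name: the statement is the Claim_ definition above) =====
theorem join_class_with_file_spec : Claim_equal_join_class_with_file := by
  intro file_name class_name _ _
  unfold Spec_join_class_with_file join_class_with_file join_class_with_file_alt
  apply PySem.List.foldl_congr_mem
  intro acc key _
  simp only [jc_inner_dict, jc_fold_vals, jc_select]
  rfl
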